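-- pv_equiv track=rewrite | github.com/federissoo/KAPRA-TimeSeries-Anonymization | k-anon.py | findLDiverse
-- ===== SOURCE A (Python) =====
-- def findLDiverse(dataset, QI, SD):
--     # Find in one step the maximum level of l-diversity of dataset
--
--     # Create the blocks with the same QI
--     groups = {}
--     for d in dataset:
--         key = []
--         for qi in QI:
--             key.append(str(d[qi]))
--         key = "-".join(key)
--         if key not in groups:
--             groups[key] = []
--         groups[key].append(d)
--
--     # check the diversity for each group
--     # count the number of different SD in each group
--     # choose the smallest (fewer diverse) group
--     smallest_diverse = len(dataset)
--
--     for group in groups: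
--         sensitive_data = set()
--
--         # Iterate over all the record in the group
--         for record in groups[group]:
--             record_sd = []
--             # Iterate over all the SD attributes
--             # Create a subset with only the SD
--             for sd in SD:
--                 record_sd.append(str(record[sd]))
--             record_sd = "-".join(record_sd)
--
--             sensitive_data.add(record_sd)
--
--         if len(sensitive_data) < smallest_diverse:
--             smallest_diverse = len(sensitive_data)
--
--     return smallest_diverse
-- ===== SOURCE B (Python) =====
-- def findLDiverse(dataset, QI, SD):
--     # One fused pass: map each QI key directly to the set of distinct SD
--     # combinations seen, instead of storing record groups and rescanning them.
--     groups = {}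
--     for d in dataset:
--         qkey = "-".join(str(d[qi]) for qi in QI)
--         skey = "-".join(str(d[sd]) for sd in SD)
--         groups.setdefault(qkey, set()).add(skey)
--     return min((len(s) for s in groups.values()), default=0)
-- ===== Notes on version B (the rewrite author's own statement) =====
-- stated objective: simpler
-- what changed: B fuses A's two phases into one pass that maintains a dict mapping each QI key to the set of distinct SD keys (never storing the record groups), then takes the minimum set size with default 0.
import Mathlib
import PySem

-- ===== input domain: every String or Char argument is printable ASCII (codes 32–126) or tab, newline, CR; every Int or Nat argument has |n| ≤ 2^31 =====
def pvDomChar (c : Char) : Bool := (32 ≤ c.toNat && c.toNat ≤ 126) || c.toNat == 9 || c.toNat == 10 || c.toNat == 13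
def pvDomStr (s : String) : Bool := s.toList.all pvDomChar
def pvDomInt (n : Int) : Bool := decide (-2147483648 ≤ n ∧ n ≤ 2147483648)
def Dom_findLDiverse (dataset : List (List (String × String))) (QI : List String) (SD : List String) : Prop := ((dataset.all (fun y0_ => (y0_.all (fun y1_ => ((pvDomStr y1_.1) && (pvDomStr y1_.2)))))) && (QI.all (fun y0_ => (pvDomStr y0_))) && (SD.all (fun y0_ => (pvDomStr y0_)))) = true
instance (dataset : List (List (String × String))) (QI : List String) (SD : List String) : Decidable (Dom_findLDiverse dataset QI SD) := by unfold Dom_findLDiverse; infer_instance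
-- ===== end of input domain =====

-- B fuses A's group-then-rescan into one pass keeping a dict of sets of SD keys (simpler; same return value).

-- ===== PORT A =====
-- '-'.join(str(d[k]) for accumulated k), built by appending in a loop as A does
def pvJoinA (keys : List String) (d : List (String × String)) : String :=
  PySem.Str.join "-" (keys.foldl (fun acc k => acc ++ [(PySem.Dict.ofList d).getD k ""]) [])

-- the grouping loop of A: blocks of records with the same QI key
def pvGroupsA (dataset : List (List (String × String))) (QI : List String) :
    PySem.Dict String (List (List (String × String))) :=
  dataset.foldl
    (fun g d =>
      let key := pvJoinA QI d
      let g' := if g.contains key then g else g.insert key []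
      g'.modify key [] (fun l => l ++ [d]))
    PySem.Dict.empty

def findLDiverse (dataset : List (List (String × String))) (QI : List String) (SD : List String) : Int :=
  (pvGroupsA dataset QI).keys.foldl
    (fun smallest k =>
      let sens := ((pvGroupsA dataset QI).getD k []).foldl
        (fun s r => PySem.Set.add s (pvJoinA SD r)) PySem.Set.empty
      if PySem.Set.len sens < smallest then PySem.Set.len sens else smallest)
    (dataset.length : Int)

-- ===== PORT B =====
-- '-'.join(str(d[k]) for k in keys)
def pvKey (keys : List String) (d : List (String × String)) : String :=
  PySem.Str.join "-" (keys.map (fun k => (PySem.Dict.ofList d).getD k ""))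

-- the single fused pass of B: QI key ↦ set of distinct SD keys
def pvGroupsB (dataset : List (List (String × String))) (QI SD : List String) :
    PySem.Dict String (PySem.Set String) :=
  dataset.foldl
    (fun g d => g.modify (pvKey QI d) PySem.Set.empty (fun s => PySem.Set.add s (pvKey SD d)))
    PySem.Dict.empty

def findLDiverse_alt (dataset : List (List (String × String))) (QI : List String) (SD : List String) : Int :=
  PySem.List.minD ((pvGroupsB dataset QI SD).values.map (fun s => PySem.Set.len s)) (fun x => x) 0

-- ===== PRECONDITION & SPEC =====
-- Pre_ excludes inputs where some record lacks a QI or SD key: Python A raises KeyError there.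
def Pre_findLDiverse (dataset : List (List (String × String))) (QI : List String) (SD : List String) : Prop :=
  ∀ d ∈ dataset, (∀ k ∈ QI, (PySem.Dict.ofList d).contains k = true) ∧
    (∀ k ∈ SD, (PySem.Dict.ofList d).contains k = true)
instance (dataset : List (List (String × String))) (QI : List String) (SD : List String) : Decidable (Pre_findLDiverse dataset QI SD) := by unfold Pre_findLDiverse; infer_instance

def pvWitness_findLDiverse : (List (List (String × String))) × List String × List String :=
  ([[("a", "1"), ("s", "x")], [("a", "1"), ("s", "y")]], ["a"], ["s"])

def Spec_findLDiverse (dataset : List (List (String × String))) (QI : List String) (SD : List String) (out : Int) : Prop := out = findLDiverse_alt dataset QI SD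
instance (dataset : List (List (String × String))) (QI : List String) (SD : List String) (out : Int) : Decidable (Spec_findLDiverse dataset QI SD out) := by unfold Spec_findLDiverse; infer_instance

-- ===== CLAIM (what is proved, stated in full; the proofs are below) =====
def Claim_equal_findLDiverse : Prop := ∀ (dataset : List (List (String × String))) (QI : List String) (SD : List String), Dom_findLDiverse dataset QI SD → Pre_findLDiverse dataset QI SD → Spec_findLDiverse dataset QI SD (findLDiverse dataset QI SD)

-- ===== LEMMAS AND PROOFS =====

-- A's loop-built key equals B's comprehension-built key
lemma pvJoinA_eq (keys : List String) (d : List (String × String)) :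
    pvJoinA keys d = pvKey keys d := by
  unfold pvJoinA pvKey
  rw [PySem.List.foldl_append_singleton_eq_map, List.nil_append]

-- A's "if key not in groups: groups[key] = []; groups[key].append(d)" is one modify
lemma pv_stepA (g : PySem.Dict String (List (List (String × String))))
    (key : String) (d : List (String × String)) :
    (if g.contains key then g else g.insert key []).modify key [] (fun l => l ++ [d])
      = g.modify key [] (fun l => l ++ [d]) := by
  by_cases h : g.contains key
  · simp [h]
  · rw [Bool.not_eq_true] at h
    simp [PySem.Dict.modify, h, PySem.Dict.getD_insert_self,
      PySem.Dict.insert_insert_self, PySem.Dict.getD_of_not_contains _ _ h]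

lemma pvGroupsA_eq (dataset : List (List (String × String))) (QI : List String) :
    pvGroupsA dataset QI
      = dataset.foldl (fun g d => g.modify (pvKey QI d) [] (fun l => l ++ [d]))
          PySem.Dict.empty := by
  unfold pvGroupsA
  refine PySem.List.foldl_congr_mem _ _ _ _ ?_
  intro g d _
  show (if g.contains (pvJoinA QI d) then g else g.insert (pvJoinA QI d) []).modify
      (pvJoinA QI d) [] (fun l => l ++ [d]) = _
  rw [pvJoinA_eq, pv_stepA]

-- generic: the value at key c of a "modify at (qk x)" grouping loop is the fold of f
-- over the (sk-images of the) records whose key is c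
lemma pv_getD_group {ν β : Type} (f : ν → β → ν) (dflt : ν)
    (qk : List (String × String) → String) (sk : List (String × String) → β)
    (l : List (List (String × String))) (g : PySem.Dict String ν) (c : String) :
    (l.foldl (fun g x => g.modify (qk x) dflt (fun v => f v (sk x))) g).getD c dflt
      = ((l.filter (fun x => qk x == c)).map sk).foldl f (g.getD c dflt) := by
  induction l generalizing g with
  | nil => simp
  | cons d t ih =>
    simp only [List.foldl_cons, List.filter_cons]
    rw [ih, PySem.Dict.getD_modify]
    by_cases h : qk d = c
    · subst h; simp
    · simp [h, Ne.symm h]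

lemma pv_getD_A (dataset : List (List (String × String))) (QI : List String) (c : String) :
    (pvGroupsA dataset QI).getD c []
      = dataset.filter (fun d => pvKey QI d == c) := by
  rw [pvGroupsA_eq]
  exact (pv_getD_group (fun l r => l ++ [r]) [] (pvKey QI) (fun x => x) dataset
    PySem.Dict.empty c).trans (by
      simp only [PySem.Dict.getD_empty, List.map_id', List.map_id,
        PySem.List.foldl_append_singleton_eq_self, List.nil_append])

lemma pv_getD_B (dataset : List (List (String × String))) (QI SD : List String) (c : String) :
    (pvGroupsB dataset QI SD).getD c PySem.Set.empty
      = ((dataset.filter (fun d => pvKey QI d == c)).map (pvKey SD)).foldl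
          PySem.Set.add PySem.Set.empty := by
  unfold pvGroupsB
  exact (pv_getD_group PySem.Set.add PySem.Set.empty (pvKey QI) (pvKey SD) dataset
    PySem.Dict.empty c).trans (by simp)

lemma pv_keys_A (dataset : List (List (String × String))) (QI : List String) :
    (pvGroupsA dataset QI).keys = PySem.Set.ofList (dataset.map (pvKey QI)) := by
  rw [pvGroupsA_eq,
    PySem.Dict.keys_foldl_modify_key dataset (pvKey QI) [] (fun _ d => fun l => l ++ [d])]
  rw [PySem.Set.ofList_eq_foldl]; rfl

lemma pv_keys_B (dataset : List (List (String × String))) (QI SD : List String) :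
    (pvGroupsB dataset QI SD).keys = PySem.Set.ofList (dataset.map (pvKey QI)) := by
  unfold pvGroupsB
  rw [PySem.Dict.keys_foldl_modify_key dataset (pvKey QI) PySem.Set.empty
    (fun _ d => fun s => PySem.Set.add s (pvKey SD d))]
  rw [PySem.Set.ofList_eq_foldl]; rfl

lemma pv_nodup_keys_B (dataset : List (List (String × String))) (QI SD : List String) :
    (pvGroupsB dataset QI SD).keys.Nodup := by
  unfold pvGroupsB
  exact PySem.Dict.nodup_keys_foldl_modify_key dataset (pvKey QI) PySem.Set.empty
    (fun _ d => fun s => PySem.Set.add s (pvKey SD d)) PySem.Dict.empty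
    (by rw [PySem.Dict.keys_empty]; exact List.nodup_nil)

-- a set built by repeated add has at most start-length + number-of-adds elements
lemma pv_len_foldl_add {α : Type} [BEq α] (l : List α) (s : PySem.Set α) :
    (l.foldl PySem.Set.add s).length ≤ s.length + l.length := by
  induction l generalizing s with
  | nil => simp
  | cons x t ih =>
    refine le_trans (ih _) ?_
    simp only [PySem.Set.add]
    split_ifs <;> simp <;> omega

-- the running-min loop of A started at an upper bound equals Python's min(xs, default=0)
lemma pv_minfold {α : Type} (xs : List α) (f : α → Int) (L : Int)
    (hb : ∀ x ∈ xs, f x ≤ L) (h0 : xs = [] → L = 0) :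
    xs.foldl (fun m v => if f v < m then f v else m) L
      = PySem.List.minD (xs.map f) (fun x => x) 0 := by
  cases xs with
  | nil => simp [PySem.List.minD, PySem.List.min?, h0 rfl]
  | cons x t =>
    have hx : f x ≤ L := hb x (List.mem_cons_self)
    simp only [List.map_cons, PySem.List.minD, PySem.List.min?_id_cons, Option.getD_some,
      List.foldl_cons, List.foldl_map]
    have h1 : (if f x < L then f x else L) = f x := by split_ifs <;> omega
    rw [h1]
    refine PySem.List.foldl_congr_mem _ _ _ _ ?_
    intro m v _
    rw [Int.min_def]; split_ifs <;> omega

lemma pv_main (dataset : List (List (String × String))) (QI SD : List String) :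
    findLDiverse dataset QI SD = findLDiverse_alt dataset QI SD := by
  unfold findLDiverse findLDiverse_alt
  have hsens : ∀ k : String,
      ((pvGroupsA dataset QI).getD k []).foldl
          (fun s r => PySem.Set.add s (pvJoinA SD r)) PySem.Set.empty
        = (pvGroupsB dataset QI SD).getD k PySem.Set.empty := by
    intro k
    rw [pv_getD_A, pv_getD_B, List.foldl_map]
    exact PySem.List.foldl_congr_mem _ _ _ _ (by intro s r _; rw [pvJoinA_eq])
  have hA : (pvGroupsA dataset QI).keys.foldl
      (fun smallest k =>
        let sens := ((pvGroupsA dataset QI).getD k []).foldl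
          (fun s r => PySem.Set.add s (pvJoinA SD r)) PySem.Set.empty
        if PySem.Set.len sens < smallest then PySem.Set.len sens else smallest)
      (dataset.length : Int)
    = (PySem.Set.ofList (dataset.map (pvKey QI))).foldl
        (fun smallest k =>
          if PySem.Set.len ((pvGroupsB dataset QI SD).getD k PySem.Set.empty) < smallest
          then PySem.Set.len ((pvGroupsB dataset QI SD).getD k PySem.Set.empty) else smallest)
        (dataset.length : Int) := by
    rw [pv_keys_A]
    refine PySem.List.foldl_congr_mem _ _ _ _ ?_
    intro m k _
    simp only [hsens k]
  rw [hA]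
  have hB : (pvGroupsB dataset QI SD).values.map (fun s => PySem.Set.len s)
      = (PySem.Set.ofList (dataset.map (pvKey QI))).map
          (fun k => PySem.Set.len ((pvGroupsB dataset QI SD).getD k PySem.Set.empty)) := by
    rw [PySem.Dict.values_eq_map_keys _ (pv_nodup_keys_B dataset QI SD) PySem.Set.empty,
      pv_keys_B, List.map_map]
    rfl
  rw [hB]
  refine pv_minfold _ (fun k => PySem.Set.len ((pvGroupsB dataset QI SD).getD k PySem.Set.empty))
    _ ?_ ?_
  · intro k _
    show PySem.Set.len ((pvGroupsB dataset QI SD).getD k PySem.Set.empty)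
      ≤ (dataset.length : Int)
    rw [pv_getD_B]
    have h1 := pv_len_foldl_add
      ((dataset.filter (fun d => pvKey QI d == k)).map (pvKey SD)) PySem.Set.empty
    have h2 : ((dataset.filter (fun d => pvKey QI d == k)).map (pvKey SD)).length
        ≤ dataset.length := by
      rw [List.length_map]; exact List.length_filter_le _ _
    simp only [PySem.Set.len]
    have h3 : (PySem.Set.empty : PySem.Set String).length = 0 := rfl
    omega
  · intro h
    cases dataset with
    | nil => rfl
    | cons d t =>
      exfalso
      have hmem : pvKey QI d ∈ PySem.Set.ofList ((d :: t).map (pvKey QI)) := by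
        rw [PySem.Set.mem_ofList]
        exact List.mem_map_of_mem (List.mem_cons_self)
      rw [h] at hmem
      exact List.not_mem_nil hmem

-- ===== VERDICT (by name: the statement is the Claim_ definition above) =====
theorem findLDiverse_spec : Claim_equal_findLDiverse := by
  intro dataset QI SD _ _
  unfold Spec_findLDiverse
  exact pv_main dataset QI SD
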